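-- pv_equiv track=rewrite | github.com/yjsayya/Algorithms | 1. Programmers/lv1/lv1(정답률60%이상)/lv1_과일장수.py | solution2
-- ===== SOURCE A (Python) =====
-- def solution2(k, m, score):
--
--     price = 0
--     score.sort(reverse=True)
--
--     idx = m
--     for i in range(len(score)//m):
--         price += min(score[idx-m:idx]) * m
--         idx += m
--
--     return price
-- ===== SOURCE B (Python) =====
-- def solution2(k, m, score):
--     # Histogram + run arithmetic: no full sort, no per-block min scans.
--     # (Return value only: A additionally sorts `score` in place; B leaves it untouched.)
--     n = len(score)
--     q = n // m                  # number of full blocks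
--     if q <= 0:
--         return 0
--     end = q * m                 # block-end positions are m-1, 2m-1, ..., end-1
--     cnt = {}
--     for v in score:
--         cnt[v] = cnt.get(v, 0) + 1
--     total = 0
--     pos = 0                     # start of the current value's run in the descending order
--     for v in sorted(cnt, reverse=True):
--         hi = pos + cnt[v]
--         top = hi if hi < end else end
--         if pos < top:
--             total += v * (top // m - pos // m)   # block ends landing inside this run
--         pos = hi
--     return total * m
-- ===== Notes on version B (the rewrite author's own statement) =====
-- stated objective: alternative
-- what changed: A sorts the whole list descending and computes min() over each m-element slice; B never materialises the sorted list: it builds a value histogram (dict) in one pass, walks the sorted DISTINCT values once, and computes by floor-division arithmetic how many block-end positions of the virtual descending order fall inside each value's run. B does not mutate `score` (A sorts it in place); return values agree.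
import Mathlib
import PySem

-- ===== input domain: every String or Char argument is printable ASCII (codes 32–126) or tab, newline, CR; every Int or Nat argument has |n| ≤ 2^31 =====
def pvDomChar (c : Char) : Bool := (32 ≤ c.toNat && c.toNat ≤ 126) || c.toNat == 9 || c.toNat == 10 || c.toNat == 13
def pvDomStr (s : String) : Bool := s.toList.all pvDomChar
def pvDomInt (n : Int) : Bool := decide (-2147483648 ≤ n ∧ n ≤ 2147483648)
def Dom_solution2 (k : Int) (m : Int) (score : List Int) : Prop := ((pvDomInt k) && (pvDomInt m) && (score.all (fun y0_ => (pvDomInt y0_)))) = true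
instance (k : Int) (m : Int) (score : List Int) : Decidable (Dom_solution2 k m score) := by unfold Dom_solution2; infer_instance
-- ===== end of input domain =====

-- B replaces A's sort + per-block min scans by a value histogram and one pass over the sorted
-- DISTINCT values, counting by floor-division arithmetic how many block-end positions fall in
-- each value's run; objective: alternative. Return value only: A sorts `score` in place, B does not.

-- ===== PORT A =====
def solution2 (k : Int) (m : Int) (score : List Int) : Int :=
  let s := PySem.List.sorted score (fun x => x) true
  -- for i in range(len(score)//m): price += min(score[idx-m:idx]) * m; idx += m
  -- (Python's min raises on an empty slice; under Pre_ the slice is never empty, so .getD 0 is never taken)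
  let st := (PySem.List.pyRange 0 (PySem.Int.floordiv (s.length : Int) m) 1).foldl
      (fun (pi : Int × Int) _ =>
        (pi.1 + (PySem.List.min? (PySem.List.slice s (some (pi.2 - m)) (some pi.2)) (fun x => x)).getD 0 * m,
         pi.2 + m))
      (0, m)
  st.1

-- ===== PORT B =====
def solution2_alt (k : Int) (m : Int) (score : List Int) : Int :=
  let n : Int := (score.length : Int)
  let q := PySem.Int.floordiv n m
  if q ≤ 0 then 0
  else
    let endP := q * m
    -- cnt = {}; for v in score: cnt[v] = cnt.get(v, 0) + 1
    let cnt := score.foldl (fun d v => d.insert v (d.getD v 0 + 1)) (PySem.Dict.empty : PySem.Dict Int Int)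
    -- for v in sorted(cnt, reverse=True): …
    let st := (PySem.List.sorted cnt.keys (fun x => x) true).foldl
      (fun (st : Int × Int) v =>
        let hi := st.2 + cnt.getD v 0
        let top := if hi < endP then hi else endP
        ((if st.2 < top then st.1 + v * (PySem.Int.floordiv top m - PySem.Int.floordiv st.2 m) else st.1), hi))
      (0, 0)
    st.1 * m

-- ===== PRECONDITION & SPEC =====
-- Pre_ excludes exactly m = 0, where A raises ZeroDivisionError (len(score)//m) and B raises too (n // m).
def Pre_solution2 (k : Int) (m : Int) (score : List Int) : Prop := m ≠ 0
instance (k : Int) (m : Int) (score : List Int) : Decidable (Pre_solution2 k m score) := by unfold Pre_solution2; infer_instance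
def pvWitness_solution2 : Int × Int × List Int := (4, 3, [4, 1, 2, 2, 4, 4, 1])

def Spec_solution2 (k : Int) (m : Int) (score : List Int) (out : Int) : Prop := out = solution2_alt k m score
instance (k : Int) (m : Int) (score : List Int) (out : Int) : Decidable (Spec_solution2 k m score out) := by unfold Spec_solution2; infer_instance

-- ===== CLAIM (what is proved, stated in full; the proofs are below) =====
def Claim_equal_solution2 : Prop := ∀ (k : Int) (m : Int) (score : List Int), Dom_solution2 k m score → Pre_solution2 k m score → Spec_solution2 k m score (solution2 k m score)

-- ===== LEMMAS AND PROOFS =====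

-- ---- A-side: characterise A's loop as the sum of block minima of the descending sort ----

-- min of a nonempty descending-sorted list is its last element
lemma min_desc (t : List Int) (h : 0 < t.length) (hp : t.Pairwise (fun a b => b ≤ a)) :
    (PySem.List.min? t (fun x => x)).getD 0 = t[t.length - 1]'(by omega) := by
  rcases hm0 : PySem.List.min? t (fun x => x) with _ | m0
  · rw [PySem.List.min?_eq_none_iff] at hm0; simp [hm0] at h
  · have hmem := PySem.List.min?_mem hm0
    have hmin := PySem.List.min?_isMin hm0
    obtain ⟨i, hi, hie⟩ := List.mem_iff_getElem.1 hmem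
    rw [List.pairwise_iff_getElem] at hp
    simp only [Option.getD_some]
    apply le_antisymm
    · exact hmin _ (List.getElem_mem _)
    · rw [← hie]
      rcases eq_or_lt_of_le (Nat.le_sub_one_of_lt hi) with he | hlt
      · exact le_of_eq (by congr 1; omega)
      · exact hp i (t.length - 1) hi (by omega) hlt

-- min of a nonempty in-range block of a descending-sorted list is the element just before its right end
lemma min_block (s : List Int) (hp : s.Pairwise (fun a b => b ≤ a)) (a n' : Nat)
    (hn : 0 < n') (hb : a + n' ≤ s.length) :
    (PySem.List.min? ((s.drop a).take n') (fun x => x)).getD 0 = s[a + n' - 1]'(by omega) := by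
  have hlen : ((s.drop a).take n').length = n' := by
    simp [List.length_take, List.length_drop]; omega
  have hsub : ((s.drop a).take n').Sublist s :=
    (List.take_sublist _ _).trans (List.drop_sublist _ _)
  rw [min_desc _ (by omega) (hp.sublist hsub)]
  rw [List.getElem_take, List.getElem_drop]
  congr 1
  omega

-- A's loop, characterised as a sum over block indices
lemma foldA (s : List Int) (m : Int) (q : Nat) :
    ((PySem.List.pyRange 0 (q : Int) 1).foldl
      (fun (pi : Int × Int) _ =>
        (pi.1 + (PySem.List.min? (PySem.List.slice s (some (pi.2 - m)) (some pi.2)) (fun x => x)).getD 0 * m,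
         pi.2 + m)) (0, m))
    = (((List.range q).map (fun (j : Nat) =>
          (PySem.List.min? (PySem.List.slice s (some ((j : Int) * m)) (some ((j : Int) * m + m))) (fun x => x)).getD 0 * m)).sum,
       m + (q : Int) * m) := by
  induction q with
  | zero => simp [PySem.List.pyRange_one_eq_nil (by omega : (0:Int) ≤ 0)]
  | succ q ih =>
    rw [show ((q + 1 : Nat) : Int) = (q : Int) + 1 by push_cast; ring,
        PySem.List.pyRange_one_succ_right (by positivity), List.foldl_append, ih]
    rw [List.range_succ, List.map_append, List.sum_append]
    simp only [List.foldl_cons, List.foldl_nil, List.map_cons, List.map_nil, List.sum_cons,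
      List.sum_nil]
    refine Prod.ext ?_ ?_
    · simp only []
      rw [show m + (q : Int) * m - m = (q : Int) * m by ring,
          show m + (q : Int) * m = (q : Int) * m + m by ring]
      ring
    · simp only []
      ring

def Ssum (M q p : Nat) (L : List Int) : Int :=
  ((List.range q).map (fun j => if p ≤ j * M + M - 1 then L.getD (j * M + M - 1 - p) 0 else 0)).sum

lemma countP_interval (q a b : Nat) :
    (List.range q).countP (fun j => decide (a ≤ j) && decide (j < b)) = min b q - min a q := by
  induction q with
  | zero => simp
  | succ q ih =>
    rw [List.range_succ, List.countP_append, ih]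
    by_cases h1 : a ≤ q <;> by_cases h2 : q < b <;>
      simp [h1, h2] <;> omega

lemma min_div (x q M : Nat) (hM : 0 < M) : min (x / M) q = min x (q * M) / M := by
  rcases le_total x (q * M) with h | h
  · rw [min_eq_left h, min_eq_left]
    calc x / M ≤ q * M / M := Nat.div_le_div_right h
    _ = q := Nat.mul_div_cancel q hM
  · rw [min_eq_right h, Nat.mul_div_cancel q hM, min_eq_right]
    calc q = q * M / M := (Nat.mul_div_cancel q hM).symm
    _ ≤ x / M := Nat.div_le_div_right h

lemma Ssum_step (M q p c : Nat) (hM : 0 < M) (v : Int) (L' : List Int) :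
    Ssum M q p (List.replicate c v ++ L') =
      v * (((min ((p + c) / M) q : Nat) : Int) - ((min (p / M) q : Nat) : Int)) + Ssum M q (p + c) L' := by
  unfold Ssum
  have hterm : ∀ j ∈ List.range q,
      (if p ≤ j * M + M - 1 then (List.replicate c v ++ L').getD (j * M + M - 1 - p) 0 else 0)
        = v * (if (decide (p / M ≤ j) && decide (j < (p + c) / M)) then 1 else 0)
          + (if p + c ≤ j * M + M - 1 then L'.getD (j * M + M - 1 - (p + c)) 0 else 0) := by
    intro j _
    have hsum : (j + 1) * M = j * M + M := by ring
    have h1 : (p ≤ j * M + M - 1) ↔ p / M ≤ j := by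
      constructor
      · intro h
        have := (Nat.div_lt_iff_lt_mul hM).2 (show p < (j + 1) * M by omega)
        omega
      · intro h
        have := (Nat.div_lt_iff_lt_mul hM).1 (show p / M < j + 1 by omega)
        omega
    have h2 : (j * M + M - 1 < p + c) ↔ j < (p + c) / M := by
      constructor
      · intro h
        have := (Nat.le_div_iff_mul_le hM).2 (show (j + 1) * M ≤ p + c by omega)
        omega
      · intro h
        have := (Nat.le_div_iff_mul_le hM).1 (show j + 1 ≤ (p + c) / M by omega)
        omega
    by_cases ha : p ≤ j * M + M - 1
    · by_cases hb : j * M + M - 1 < p + c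
      · have hlt : j * M + M - 1 - p < c := by omega
        have hP : (decide (p / M ≤ j) && decide (j < (p + c) / M)) = true := by
          simp only [Bool.and_eq_true, decide_eq_true_eq]
          exact ⟨h1.1 ha, h2.1 hb⟩
        rw [if_pos ha, List.getD_append _ _ _ _ (by simpa using hlt),
            List.getD_replicate _ hlt, hP, if_neg (show ¬ p + c ≤ j * M + M - 1 by omega)]
        simp
      · have hc2 : p + c ≤ j * M + M - 1 := by omega
        have hP : ¬ ((decide (p / M ≤ j) && decide (j < (p + c) / M)) = true) := by
          simp only [Bool.and_eq_true, decide_eq_true_eq]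
          rintro ⟨-, h⟩
          exact hb (h2.2 h)
        have hcle : c ≤ j * M + M - 1 - p := by omega
        rw [if_pos ha, if_pos hc2, List.getD_append_right _ _ _ _ (by simpa using hcle),
            if_neg hP, List.length_replicate,
            show j * M + M - 1 - p - c = j * M + M - 1 - (p + c) by omega]
        simp
    · have hP : ¬ ((decide (p / M ≤ j) && decide (j < (p + c) / M)) = true) := by
        simp only [Bool.and_eq_true, decide_eq_true_eq]
        rintro ⟨h, -⟩
        exact ha (h1.2 h)
      rw [if_neg ha, if_neg (show ¬ p + c ≤ j * M + M - 1 by omega), if_neg hP]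
      simp
  rw [List.map_congr_left hterm, PySem.List.sum_map_add_int, List.sum_map_mul_left,
      PySem.List.sum_map_ite_one_zero, countP_interval]
  have hmono : min (p / M) q ≤ min ((p + c) / M) q :=
    min_le_min (Nat.div_le_div_right (by omega)) (le_refl q)
  rw [Nat.cast_sub hmono]

lemma add_bridge (M q p c : Nat) (hM : 0 < M) (hc : 0 < c) (v t : Int) :
    (if ((p : Nat) : Int) < (if (((p + c : Nat)) : Int) < ((q * M : Nat) : Int) then (((p + c : Nat)) : Int) else ((q * M : Nat) : Int)) then
        t + v * (PySem.Int.floordiv (if (((p + c : Nat)) : Int) < ((q * M : Nat) : Int) then (((p + c : Nat)) : Int) else ((q * M : Nat) : Int)) ((M : Nat) : Int)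
                 - PySem.Int.floordiv ((p : Nat) : Int) ((M : Nat) : Int))
      else t)
    = t + v * (((min ((p + c) / M) q : Nat) : Int) - ((min (p / M) q : Nat) : Int)) := by
  have htop : (if (((p + c : Nat)) : Int) < ((q * M : Nat) : Int) then (((p + c : Nat)) : Int) else ((q * M : Nat) : Int))
      = ((min (p + c) (q * M) : Nat) : Int) := by
    by_cases h : p + c < q * M
    · rw [if_pos (by exact_mod_cast h), min_eq_left (by omega)]
    · rw [if_neg (by exact_mod_cast h), min_eq_right (by omega)]
  rw [htop]
  by_cases hcond : p < min (p + c) (q * M)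
  · rw [if_pos (by exact_mod_cast hcond), PySem.Int.floordiv_natCast, PySem.Int.floordiv_natCast]
    have hpE : p < q * M := lt_of_lt_of_le hcond (min_le_right _ _)
    have : p / M < q := (Nat.div_lt_iff_lt_mul hM).2 hpE
    rw [← min_div _ _ _ hM, min_eq_left (le_of_lt this)]
  · rw [if_neg (by exact_mod_cast hcond)]
    have hpE : q * M ≤ p := by
      rcases le_total (p + c) (q * M) with h | h
      · omega
      · rw [min_eq_right h] at hcond; omega
    have h1 : q ≤ p / M := (Nat.le_div_iff_mul_le hM).2 hpE
    have h2 : q ≤ (p + c) / M := le_trans h1 (Nat.div_le_div_right (by omega))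
    rw [min_eq_right h1, min_eq_right h2]
    simp

def stepB (M q : Nat) (c : Int → Nat) (st : Int × Int) (v : Int) : Int × Int :=
  ((if st.2 < (if st.2 + ((c v : Nat) : Int) < ((q * M : Nat) : Int) then st.2 + ((c v : Nat) : Int) else ((q * M : Nat) : Int)) then
      st.1 + v * (PySem.Int.floordiv (if st.2 + ((c v : Nat) : Int) < ((q * M : Nat) : Int) then st.2 + ((c v : Nat) : Int) else ((q * M : Nat) : Int)) ((M : Nat) : Int)
                  - PySem.Int.floordiv st.2 ((M : Nat) : Int))
    else st.1), st.2 + ((c v : Nat) : Int))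

lemma foldB (M q : Nat) (hM : 0 < M) (c : Int → Nat) (ks : List Int)
    (hpos : ∀ v ∈ ks, 0 < c v) (p : Nat) (t : Int) :
    (ks.foldl (stepB M q c) (t, ((p : Nat) : Int))).1
    = t + Ssum M q p (ks.flatMap (fun v => List.replicate (c v) v)) := by
  induction ks generalizing p t with
  | nil =>
    simp [Ssum]
  | cons v rest ih =>
    rw [List.foldl_cons]
    have hstep : stepB M q c (t, ((p : Nat) : Int)) v
        = (t + v * (((min ((p + c v) / M) q : Nat) : Int) - ((min (p / M) q : Nat) : Int)), (((p + c v : Nat)) : Int)) := by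
      unfold stepB
      have hb := add_bridge M q p (c v) hM (hpos v (List.mem_cons_self)) v t
      refine Prod.ext ?_ ?_
      · simp only []
        rw [show ((p : Int) + ((c v : Nat) : Int)) = (((p + c v : Nat)) : Int) by push_cast; ring] at *
        exact hb
      · simp only []
        push_cast; ring
    rw [hstep, ih (fun w hw => hpos w (List.mem_cons_of_mem _ hw))]
    rw [List.flatMap_cons, Ssum_step M q p (c v) hM v]
    ring

lemma count_flatMap_replicate (c : Int → Nat) (ks : List Int) (hnd : ks.Nodup) (x : Int) :
    (ks.flatMap (fun v => List.replicate (c v) v)).count x = if x ∈ ks then c x else 0 := by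
  induction ks with
  | nil => simp
  | cons v rest ih =>
    rw [List.flatMap_cons, List.count_append, ih hnd.of_cons, List.count_replicate]
    rcases List.nodup_cons.1 hnd with ⟨hv, _⟩
    by_cases hvx : v = x
    · subst hvx
      simp [hv]
    · have hxv : ¬ x = v := fun h => hvx h.symm
      simp [hvx, hxv, beq_iff_eq]

lemma desc_eq_flatMap (score : List Int) :
    PySem.List.sorted score (fun x => x) true
      = (PySem.List.sorted (PySem.Set.ofList score) (fun x => x) true).flatMap
          (fun v => List.replicate (score.count v) v) := by
  set ks := PySem.List.sorted (PySem.Set.ofList score) (fun x => x) true with hks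
  have hksperm : ks.Perm (PySem.Set.ofList score) := PySem.List.sorted_perm _ _ _
  have hksnd : ks.Nodup := hksperm.nodup_iff.2 (PySem.Set.nodup_ofList score)
  have hkssorted : ks.Pairwise (fun a b => b ≤ a) := PySem.List.sorted_pairwise_rev _ _
  have hksstrict : ks.Pairwise (fun a b => b < a) := by
    have := List.Pairwise.and hkssorted hksnd
    exact this.imp (fun h => lt_of_le_of_ne h.1 (fun he => h.2 he.symm))
  set L := ks.flatMap (fun v => List.replicate (score.count v) v) with hL
  have hmemks : ∀ x : Int, x ∈ ks ↔ x ∈ score := by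
    intro x
    rw [hksperm.mem_iff, PySem.Set.mem_ofList]
  have hLperm : L.Perm score := by
    rw [List.perm_iff_count]
    intro x
    rw [hL, count_flatMap_replicate _ _ hksnd]
    by_cases hx : x ∈ ks
    · simp [hx]
    · rw [if_neg hx]
      exact (List.count_eq_zero.2 (fun h => hx ((hmemks x).2 h))).symm
  have hLsorted : L.Pairwise (fun a b => b ≤ a) := by
    rw [hL, List.pairwise_flatMap]
    constructor
    · intro a _
      exact List.pairwise_replicate.2 (Or.inr (le_refl _))
    · refine hksstrict.imp ?_
      intro a b hab x hx y hy
      rw [List.eq_of_mem_replicate hx, List.eq_of_mem_replicate hy]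
      exact hab.le
  have hsperm : (PySem.List.sorted score (fun x => x) true).Perm L :=
    (PySem.List.sorted_perm _ _ _).trans hLperm.symm
  exact List.Perm.eq_of_pairwise
    (fun a b _ _ h1 h2 => le_antisymm h2 h1)
    (PySem.List.sorted_pairwise_rev _ _) hLsorted hsperm

-- ===== VERDICT (by name: the statement is the Claim_ definition above) =====
theorem solution2_spec : Claim_equal_solution2 := by
  intro k m score _ hpre
  unfold Spec_solution2 solution2 solution2_alt
  simp only []
  set s := PySem.List.sorted score (fun x => x) true with hs
  have hslen : s.length = score.length := (PySem.List.sorted_perm score (fun x => x) true).length_eq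
  rcases lt_trichotomy m 0 with hm | hm | hm
  · -- m < 0 : A's loop is empty and B takes its q ≤ 0 branch; both sides are 0
    have hq : ∀ N : Nat, PySem.Int.floordiv (N : Int) m ≤ 0 := by
      intro N
      by_contra hq
      rw [not_le] at hq
      have h1 := PySem.Int.floordiv_mul_add_mod (N : Int) m
      have h2 := PySem.Int.mod_neg_bounds (N : Int) hm
      have h3 : PySem.Int.floordiv (N : Int) m * m ≤ 1 * m :=
        mul_le_mul_of_nonpos_right (by omega) hm.le
      have h4 : (0 : Int) ≤ (N : Int) := Nat.cast_nonneg _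
      linarith
    rw [PySem.List.pyRange_one_eq_nil (hq s.length), if_pos (hq score.length)]
    simp
  · exact absurd hm hpre
  · -- m > 0
    obtain ⟨M, rfl⟩ : ∃ M : Nat, m = (M : Int) := ⟨m.toNat, (Int.toNat_of_nonneg hm.le).symm⟩
    have hM : 0 < M := by exact_mod_cast hm
    set q : Nat := score.length / M with hqdef
    have hfdA : PySem.Int.floordiv (s.length : Int) (M : Int) = (q : Int) := by
      rw [hslen]; exact PySem.Int.floordiv_natCast score.length M
    have hfdB : PySem.Int.floordiv (score.length : Int) (M : Int) = (q : Int) :=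
      PySem.Int.floordiv_natCast score.length M
    rw [hfdA, hfdB]
    by_cases hq0 : q = 0
    · -- no full block: A's range is empty, B returns 0 from its early branch
      rw [hq0, if_pos (by norm_num), PySem.List.pyRange_one_eq_nil (by norm_num)]
      simp
    · rw [if_neg (show ¬ (q : Int) ≤ 0 by have := Nat.pos_of_ne_zero hq0; push_cast; omega)]
      -- descending sort as runs over the sorted distinct values
      have hpair : s.Pairwise (fun a b => b ≤ a) := PySem.List.sorted_pairwise_rev score (fun x => x)
      have hcnt : score.foldl (fun d v => d.insert v (d.getD v 0 + 1)) (PySem.Dict.empty : PySem.Dict Int Int)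
          = PySem.Dict.counter score := rfl
      rw [hcnt, PySem.Dict.keys_counter]
      set ks := PySem.List.sorted (PySem.Set.ofList score) (fun x => x) true with hks
      -- B's loop body is stepB
      have hqM : (q : Int) * (M : Int) = ((q * M : Nat) : Int) := by push_cast; ring
      have hfun : (fun (st : Int × Int) v =>
            ((if st.2 < (if st.2 + (PySem.Dict.counter score).getD v 0 < (q : Int) * (M : Int) then st.2 + (PySem.Dict.counter score).getD v 0 else (q : Int) * (M : Int)) then
                st.1 + v * (PySem.Int.floordiv (if st.2 + (PySem.Dict.counter score).getD v 0 < (q : Int) * (M : Int) then st.2 + (PySem.Dict.counter score).getD v 0 else (q : Int) * (M : Int)) (M : Int)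
                            - PySem.Int.floordiv st.2 (M : Int))
              else st.1), st.2 + (PySem.Dict.counter score).getD v 0))
          = stepB M q (fun v => score.count v) := by
        funext st v
        unfold stepB
        rw [PySem.Dict.getD_counter, hqM]
      rw [hfun]
      have hfold := foldB M q hM (fun v => score.count v) ks
        (fun v hv => by
          have : v ∈ score := by
            rw [← PySem.Set.mem_ofList score v]
            exact ((PySem.List.sorted_perm (PySem.Set.ofList score) (fun x => x) true).mem_iff).1 hv
          exact List.count_pos_iff.2 this) 0 0
      rw [show ((0 : Nat) : Int) = 0 from rfl] at hfold
      rw [hfold, ← desc_eq_flatMap score, ← hs, zero_add]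
      -- A's loop is the sum of block minima
      rw [foldA]
      have hA : ((List.range q).map (fun (j : Nat) =>
            (PySem.List.min? (PySem.List.slice s (some ((j : Int) * (M : Int))) (some ((j : Int) * (M : Int) + (M : Int)))) (fun x => x)).getD 0 * (M : Int)))
          = ((List.range q).map (fun (j : Nat) => (fun j => s.getD (j * M + M - 1) 0) j * (M : Int))) := by
        apply List.map_congr_left
        intro j hj
        rw [List.mem_range] at hj
        beta_reduce
        have hbound : j * M + M ≤ s.length := by
          rw [hslen]
          have h1 : (j + 1) * M ≤ score.length := (Nat.le_div_iff_mul_le hM).1 (by omega)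
          simpa [add_mul] using h1
        have hcast1 : ((j : Int) * (M : Int)) = ((j * M : Nat) : Int) := by push_cast; ring
        rw [hcast1, PySem.List.slice_natCast_add, min_block s hpair (j * M) M hM hbound,
            List.getD_eq_getElem s 0 (show j * M + M - 1 < s.length by omega)]
      rw [hA, List.sum_map_mul_right]
      -- B's sum with offset 0 is the same block-end sum
      unfold Ssum
      simp only [Nat.zero_le, if_true, Nat.sub_zero]
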